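-- pv_equiv track=rewrite | github.com/SrinuBalireddy/Python_Snippets | Programs/may/seating.py | seating
-- ===== SOURCE A (Python) =====
-- def seating(n, s):
--
--     occupied = s.split(' ')
--     available  = 0
--
--     for i in range(1,n+1):
--
--         row= str(i)
--
--         if not (row+'A' in occupied or row+'B' in occupied or row+'C' in occupied):
--             available+=1
--         if (not (row+'D' in occupied and row+'G' in occupied) and (not (row+'E' in occupied or row+'F' in occupied))):
--             available+=1
--         if not (row+'H' in occupied or row+'J' in occupied or row+'K' in occupied):
--             available+=1
--
--     return available
-- ===== SOURCE B (Python) =====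
-- def seating(n, s):
--     # index occupied seats once: row-string -> set of its occupied seat letters
--     occ = {}
--     for tok in s.split(' '):
--         if tok:
--             occ.setdefault(tok[:-1], set()).add(tok[-1])
--     valid = [str(i) for i in range(1, n + 1)]
--     available = 3 * max(n, 0)
--     for row, letters in occ.items():
--         if row in valid:
--             if 'A' in letters or 'B' in letters or 'C' in letters:
--                 available -= 1
--             if ('D' in letters and 'G' in letters) or 'E' in letters or 'F' in letters:
--                 available -= 1
--             if 'H' in letters or 'J' in letters or 'K' in letters:
--                 available -= 1
--     return available
-- ===== Notes on version B (the rewrite author's own statement) =====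
-- stated objective: alternative
-- what changed: Instead of re-scanning the whole occupied-token list ten times for every row 1..n, B indexes the tokens once into a dict from row-string to its set of occupied letters and subtracts each indexed valid row's blocked seat groups from the 3*n total, validating a row with one membership test against the row-name list.
import Mathlib
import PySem

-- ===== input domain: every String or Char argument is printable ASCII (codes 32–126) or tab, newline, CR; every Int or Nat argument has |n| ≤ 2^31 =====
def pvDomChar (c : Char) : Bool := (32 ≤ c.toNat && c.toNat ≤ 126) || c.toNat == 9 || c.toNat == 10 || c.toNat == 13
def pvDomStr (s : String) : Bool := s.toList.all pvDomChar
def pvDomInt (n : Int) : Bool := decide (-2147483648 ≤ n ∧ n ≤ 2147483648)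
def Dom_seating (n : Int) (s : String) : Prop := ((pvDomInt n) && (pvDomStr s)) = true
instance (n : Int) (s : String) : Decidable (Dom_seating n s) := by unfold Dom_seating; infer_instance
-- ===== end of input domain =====

-- B replaces A's per-row rescans of the occupied-token list by a one-pass index of the tokens
-- (row-string -> set of occupied letters) and charges each indexed valid row's blocked seat
-- groups against the 3*n total; objective: alternative (a different traversal of the data).

-- ===== PORT A =====
def seating (n : Int) (s : String) : Int :=
  let occupied := PySem.Chars.splitOn s.toList [' ']
  (PySem.List.pyRange 1 (n + 1) 1).foldl (fun available i =>
    let row := PySem.Int.toChars i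
    let available :=
      if !(occupied.contains (row ++ ['A']) || occupied.contains (row ++ ['B']) ||
           occupied.contains (row ++ ['C'])) then available + 1 else available
    let available :=
      if !(occupied.contains (row ++ ['D']) && occupied.contains (row ++ ['G'])) &&
         !(occupied.contains (row ++ ['E']) || occupied.contains (row ++ ['F'])) then
        available + 1 else available
    let available :=
      if !(occupied.contains (row ++ ['H']) || occupied.contains (row ++ ['J']) ||
           occupied.contains (row ++ ['K'])) then available + 1 else available
    available) 0

-- ===== PORT B =====
-- occ.setdefault(tok[:-1], set()).add(tok[-1]) for each non-empty token tok
def seatingIndex (toks : List (List Char)) : PySem.Dict (List Char) (PySem.Set Char) :=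
  toks.foldl (fun d tok =>
    match tok.getLast? with
    | none => d
    | some c => d.modify tok.dropLast PySem.Set.empty (fun st => st.add c)) PySem.Dict.empty

def seating_alt (n : Int) (s : String) : Int :=
  let occ := seatingIndex (PySem.Chars.splitOn s.toList [' '])
  let valid : List (List Char) :=
    (PySem.List.pyRange 1 (n + 1) 1).map PySem.Int.toChars
  occ.items.foldl (fun available p =>
    if valid.contains p.1 then
      let letters := p.2
      let available :=
        if letters.contains 'A' || letters.contains 'B' || letters.contains 'C' then
          available - 1 else available
      let available :=
        if (letters.contains 'D' && letters.contains 'G') || letters.contains 'E' ||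
           letters.contains 'F' then available - 1 else available
      let available :=
        if letters.contains 'H' || letters.contains 'J' || letters.contains 'K' then
          available - 1 else available
      available
    else available) (3 * max n 0)

-- ===== PRECONDITION & SPEC =====
def Spec_seating (n : Int) (s : String) (out : Int) : Prop := out = seating_alt n s
instance (n : Int) (s : String) (out : Int) : Decidable (Spec_seating n s out) := by unfold Spec_seating; infer_instance

-- ===== CLAIM (what is proved, stated in full; the proofs are below) =====
def Claim_equal_seating : Prop := ∀ (n : Int) (s : String), Dom_seating n s → Spec_seating n s (seating n s)

-- ===== LEMMAS AND PROOFS =====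

-- the number of the three seat groups of one row that its occupied-letter set blocks
def pvCnt (v : PySem.Set Char) : Int :=
  (if v.contains 'A' || v.contains 'B' || v.contains 'C' then 1 else 0) +
  (if (v.contains 'D' && v.contains 'G') || v.contains 'E' || v.contains 'F' then 1 else 0) +
  (if v.contains 'H' || v.contains 'J' || v.contains 'K' then 1 else 0)

theorem seatingIndex_mem_aux (toks : List (List Char)) (d0 : PySem.Dict (List Char) (PySem.Set Char))
    (row : List Char) (c : Char) :
    (c ∈ (toks.foldl (fun d tok =>
      match tok.getLast? with
      | none => d
      | some c => d.modify tok.dropLast PySem.Set.empty (fun st => st.add c)) d0).getD row PySem.Set.empty)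
    ↔ (c ∈ d0.getD row PySem.Set.empty ∨ (row ++ [c]) ∈ toks) := by
  induction toks generalizing d0 with
  | nil => simp
  | cons t ts ih =>
    simp only [List.foldl_cons]
    cases ht : t.getLast? with
    | none =>
      have : t = [] := by simpa using ht
      subst this
      simpa using ih d0
    | some x =>
      obtain ⟨l', rfl⟩ := (List.getLast?_eq_some_iff).1 ht
      simp only [List.dropLast_concat]
      rw [ih]
      have happ : (row ++ [c] = l' ++ [x]) ↔ (row = l' ∧ c = x) := by
        constructor
        · intro h
          have hlen : row.length = l'.length := by
            have := congrArg List.length h; simp at this; omega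
          have := List.append_inj h hlen
          simpa using this
        · rintro ⟨rfl, rfl⟩; rfl
      by_cases hrow : row = l'
      · subst hrow
        rw [PySem.Dict.getD_modify]
        simp [PySem.Set.mem_add, happ]
        tauto
      · rw [PySem.Dict.getD_modify]
        simp only [if_neg hrow, List.mem_cons, happ]
        tauto

theorem seatingIndex_getD_mem (toks : List (List Char)) (row : List Char) (c : Char) :
    c ∈ (seatingIndex toks).getD row PySem.Set.empty ↔ (row ++ [c]) ∈ toks := by
  unfold seatingIndex
  rw [seatingIndex_mem_aux]
  simp [PySem.Dict.getD_empty, PySem.Set.empty_eq]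

theorem seatingIndex_contains (toks : List (List Char)) (row : List Char) (c : Char) :
    toks.contains (row ++ [c]) = ((seatingIndex toks).getD row PySem.Set.empty).contains c := by
  rw [Bool.eq_iff_iff]
  rw [PySem.Set.contains_iff, seatingIndex_getD_mem]
  simp

theorem seatingIndex_nodup_aux (toks : List (List Char)) (d0 : PySem.Dict (List Char) (PySem.Set Char))
    (h : d0.keys.Nodup) :
    (toks.foldl (fun d tok =>
      match tok.getLast? with
      | none => d
      | some c => d.modify tok.dropLast PySem.Set.empty (fun st => st.add c)) d0).keys.Nodup := by
  induction toks generalizing d0 with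
  | nil => simpa using h
  | cons t ts ih =>
    simp only [List.foldl_cons]
    cases ht : t.getLast? with
    | none =>
      have : t = [] := by simpa using ht
      subst this
      exact ih d0 h
    | some x =>
      obtain ⟨l', rfl⟩ := (List.getLast?_eq_some_iff).1 ht
      simp only [List.dropLast_concat]
      apply ih
      rw [PySem.Dict.keys_modify]
      exact PySem.Dict.nodup_keys_insert _ _ _ h

theorem seatingIndex_nodup (toks : List (List Char)) : (seatingIndex toks).keys.Nodup :=
  seatingIndex_nodup_aux toks PySem.Dict.empty (by simp)

theorem digitChar_inj10 (m n : Nat) (hm : m < 10) (hn : n < 10) (h : m.digitChar = n.digitChar) : m = n := by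
  interval_cases m <;> interval_cases n <;> simp_all [Nat.digitChar]

theorem toDigits10_inj (m n : Nat) (h : Nat.toDigits 10 m = Nat.toDigits 10 n) : m = n := by
  induction m using Nat.strong_induction_on generalizing n with
  | _ m ih =>
    rw [Nat.toDigits_eq_if (n := m) (by omega), Nat.toDigits_eq_if (n := n) (by omega)] at h
    by_cases hm : m < 10 <;> by_cases hn : n < 10
    · simp only [if_pos hm, if_pos hn] at h
      exact digitChar_inj10 m n hm hn (by simpa using h)
    · simp only [if_pos hm, if_neg hn] at h
      have h2 := congrArg List.length h
      rw [List.length_append] at h2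
      have h3 := Nat.length_toDigits_pos (b := 10) (n := n / 10)
      simp only [List.length_cons, List.length_nil] at h2
      omega
    · simp only [if_neg hm, if_pos hn] at h
      have h2 := congrArg List.length h
      rw [List.length_append] at h2
      have h3 := Nat.length_toDigits_pos (b := 10) (n := m / 10)
      simp only [List.length_cons, List.length_nil] at h2
      omega
    · simp only [if_neg hm, if_neg hn] at h
      have hlen : (Nat.toDigits 10 (m / 10)).length = (Nat.toDigits 10 (n / 10)).length := by
        have h2 := congrArg List.length h
        simp [List.length_append] at h2
        omega
      obtain ⟨h1, h2⟩ := List.append_inj h hlen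
      have hdiv : m / 10 = n / 10 := ih (m / 10) (by omega) (n / 10) h1
      have hmod : m % 10 = n % 10 :=
        digitChar_inj10 _ _ (Nat.mod_lt _ (by omega)) (Nat.mod_lt _ (by omega)) (by simpa using h2)
      omega

theorem toChars_inj_pos (i j : Int) (hi : 1 ≤ i) (hj : 1 ≤ j)
    (h : PySem.Int.toChars i = PySem.Int.toChars j) : i = j := by
  unfold PySem.Int.toChars at h
  rw [if_neg (by omega), if_neg (by omega)] at h
  have := toDigits10_inj _ _ h
  omega

theorem sum_map_ite_filter {α : Type} (K : List α) (p : α → Prop) [DecidablePred p]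
    (h : α → Int) :
    (K.map (fun k => if p k then h k else 0)).sum = ((K.filter (fun k => decide (p k))).map h).sum := by
  induction K with
  | nil => simp
  | cons k K ih =>
    by_cases hp : p k <;> simp [hp, ih]

theorem sum_transfer {α : Type} [DecidableEq α] (R K : List α) (h : α → Int)
    (hR : R.Nodup) (hK : K.Nodup) (hvan : ∀ k ∈ R, k ∉ K → h k = 0) :
    (R.map h).sum = (K.map (fun k => if k ∈ R then h k else 0)).sum := by
  rw [sum_map_ite_filter K (fun k => k ∈ R) h]
  have hmapR : R.map h = R.map (fun k => if k ∈ K then h k else 0) := by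
    apply List.map_congr_left
    intro k hk
    by_cases hkK : k ∈ K
    · simp [hkK]
    · simp [hkK, hvan k hk hkK]
  rw [hmapR, sum_map_ite_filter R (fun k => k ∈ K) h]
  have hperm : (R.filter (fun k => decide (k ∈ K))).Perm (K.filter (fun k => decide (k ∈ R))) := by
    rw [List.perm_ext_iff_of_nodup (hR.filter _) (hK.filter _)]
    intro a
    simp [List.mem_filter, and_comm]
  exact List.Perm.sum_eq (hperm.map h)

-- B's subtracting loop as a sum
theorem foldl_sub {β : Type} (l : List β) (w : β → Int) (a : Int) :
    l.foldl (fun acc x => acc - w x) a = a - (l.map w).sum := by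
  induction l generalizing a with
  | nil => simp
  | cons x l ih => rw [List.foldl_cons, ih]; simp; ring

-- A's per-row contribution: 3 minus the blocked-group count
theorem seating_A_sum (n : Int) (s : String) :
    seating n s = ((PySem.List.pyRange 1 (n + 1) 1).map (fun i =>
      3 - pvCnt ((seatingIndex (PySem.Chars.splitOn s.toList [' '])).getD
        (PySem.Int.toChars i) PySem.Set.empty))).sum := by
  unfold seating
  rw [PySem.List.foldl_congr_mem _ _ (fun available i =>
      available + (3 - pvCnt ((seatingIndex (PySem.Chars.splitOn s.toList [' '])).getD
        (PySem.Int.toChars i) PySem.Set.empty))) 0 ?_]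
  · rw [PySem.List.foldl_add]; simp
  · intro acc i _
    simp only [seatingIndex_contains, pvCnt]
    generalize (((seatingIndex (PySem.Chars.splitOn s.toList [' '])).getD
        (PySem.Int.toChars i) PySem.Set.empty)) = v
    have hD : (!(v.contains 'D' && v.contains 'G') && !(v.contains 'E' || v.contains 'F'))
        = !((v.contains 'D' && v.contains 'G') || v.contains 'E' || v.contains 'F') := by
      cases v.contains 'D' <;> cases v.contains 'G' <;> cases v.contains 'E' <;>
        cases v.contains 'F' <;> rfl
    rw [hD]
    generalize (v.contains 'A' || v.contains 'B' || v.contains 'C') = b1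
    generalize ((v.contains 'D' && v.contains 'G') || v.contains 'E' || v.contains 'F') = b2
    generalize (v.contains 'H' || v.contains 'J' || v.contains 'K') = b3
    cases b1 <;> cases b2 <;> cases b3 <;> simp <;> omega

-- B as 3*max(n,0) minus the gated per-key blocked-group counts
theorem seating_B_sum (n : Int) (s : String) :
    seating_alt n s = 3 * max n 0 - ((seatingIndex (PySem.Chars.splitOn s.toList [' '])).keys.map
      (fun k => if k ∈ (PySem.List.pyRange 1 (n + 1) 1).map PySem.Int.toChars then
        pvCnt ((seatingIndex (PySem.Chars.splitOn s.toList [' '])).getD k PySem.Set.empty)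
      else 0)).sum := by
  unfold seating_alt
  rw [PySem.List.foldl_congr_mem _ _ (fun available p =>
      available - (if ((PySem.List.pyRange 1 (n + 1) 1).map PySem.Int.toChars).contains p.1
        then pvCnt p.2 else 0)) (3 * max n 0) ?_]
  · rw [foldl_sub]
    rw [PySem.Dict.items_eq_map_keys _ (seatingIndex_nodup _) PySem.Set.empty]
    rw [List.map_map]
    congr 1
    refine congrArg List.sum (List.map_congr_left ?_)
    intro k hk
    by_cases hmemR : k ∈ (PySem.List.pyRange 1 (n + 1) 1).map PySem.Int.toChars <;>
      simp [hmemR]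
  · intro acc p _
    simp only [pvCnt]
    generalize hg : ((PySem.List.pyRange 1 (n + 1) 1).map PySem.Int.toChars).contains p.1 = g
    cases g
    · simp
    · simp only [if_true]
      generalize (p.2.contains 'A' || p.2.contains 'B' || p.2.contains 'C') = b1
      generalize ((p.2.contains 'D' && p.2.contains 'G') || p.2.contains 'E' || p.2.contains 'F') = b2
      generalize (p.2.contains 'H' || p.2.contains 'J' || p.2.contains 'K') = b3
      cases b1 <;> cases b2 <;> cases b3 <;> simp <;> omega

-- ===== VERDICT (by name: the statement is the Claim_ definition above) =====
theorem seating_spec : Claim_equal_seating := by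
  intro n s _
  show seating n s = seating_alt n s
  rw [seating_A_sum, seating_B_sum]
  set toks := PySem.Chars.splitOn s.toList [' '] with htoks
  set d := seatingIndex toks with hd
  set h : List Char → Int := fun k => pvCnt (d.getD k PySem.Set.empty) with hh
  have hsplit : ((PySem.List.pyRange 1 (n + 1) 1).map (fun i => 3 - h (PySem.Int.toChars i))).sum
      = ((PySem.List.pyRange 1 (n + 1) 1).length : Int) * 3
        - ((PySem.List.pyRange 1 (n + 1) 1).map (fun i => h (PySem.Int.toChars i))).sum := by
    induction (PySem.List.pyRange 1 (n + 1) 1) with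
    | nil => simp
    | cons x l ih => simp [ih]; ring
  rw [hsplit]
  have hlen : ((PySem.List.pyRange 1 (n + 1) 1).length : Int) = max n 0 := by
    rw [PySem.List.length_pyRange_one]
    rw [show n + 1 - 1 = n from by ring, Int.toNat_eq_max]
  rw [hlen]
  have hmm : ((PySem.List.pyRange 1 (n + 1) 1).map (fun i => h (PySem.Int.toChars i))).sum
      = (((PySem.List.pyRange 1 (n + 1) 1).map PySem.Int.toChars).map h).sum := by
    rw [List.map_map]; rfl
  rw [hmm]
  have htrans := sum_transfer (((PySem.List.pyRange 1 (n + 1) 1).map PySem.Int.toChars)) d.keys h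
    (List.Nodup.map_on (fun x hx y hy hxy => toChars_inj_pos x y
        (PySem.List.mem_pyRange_one.1 hx).1 (PySem.List.mem_pyRange_one.1 hy).1 hxy)
      (PySem.List.nodup_pyRange_one 1 (n + 1)))
    (seatingIndex_nodup toks)
    (fun k _ hknot => by
      have hc : d.contains k = false := by
        rw [Bool.eq_false_iff]
        intro hc
        exact hknot ((PySem.Dict.contains_iff_mem_keys d k).1 hc)
      rw [hh]
      simp only [PySem.Dict.getD_of_not_contains d PySem.Set.empty hc]
      rfl)
  rw [htrans]
  simp only [hh]
  ring
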